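-- pv_equiv track=rewrite | github.com/ednira/cnets_project | object-centric/code/discover_occnets.py | original_end
-- ===== SOURCE A (Python) =====
-- from itertools import combinations
--
-- def out_bindings(activity_frequencies):
--
--     fr = activity_frequencies
--
--     out_arcs = {}
--     filtered = []
--     out_bindings = {}
--     all_combinations = []
--
--     outbindings_list = {}
--     value_list = []
--
--     for key in fr:
--         for value in fr[key]:
--             if fr[key][value] != 0:
--                 filtered.append(value)
--         if key not in out_arcs:
--             out_arcs[key] = {}
--             out_arcs[key] = filtered
--         filtered = []
--
--     for key in out_arcs:
--         if key not in out_bindings: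
--             out_bindings[key] = {}
--             n = len(out_arcs[key])
--         while n > 0:
--             combinations_list = list(combinations(out_arcs[key], n))
--             all_combinations.extend(combinations_list)
--             n -= 1
--         out_bindings[key] = all_combinations
--         all_combinations = []
--
--
--     for key,value in out_bindings.items():
--         for i in value:
--             j = []
--             for a in i:
--                 j.append(a)
--             value_list.append(j)
--
--         outbindings_list[key] = value_list
--         value_list = []
--
--     return outbindings_list
--
-- def original_end(act_total, activity_freq):
--
--    outgoing = out_bindings(activity_freq)
--    original_end = list()
--
--    for act in act_total.keys():
--       if act in outgoing.keys():
--          if len(outgoing[act]) == 0 and act not in original_end: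
--             original_end.append(act)
--       else:
--          original_end.append(act)
--
--    return original_end
-- ===== SOURCE B (Python) =====
-- def original_end(act_total, activity_freq):
--     return [act for act in act_total
--             if act not in activity_freq or not any(activity_freq[act].values())]
-- ===== Notes on version B (the rewrite author's own statement) =====
-- stated objective: faster
-- what changed: B drops the out_bindings construction (which enumerates every non-empty combination of each activity's non-zero out-arcs just to test emptiness) and instead keeps an activity iff it is absent from activity_freq or all its out-arc frequencies are zero, in one pass over the frequency entries.
import Mathlib
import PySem

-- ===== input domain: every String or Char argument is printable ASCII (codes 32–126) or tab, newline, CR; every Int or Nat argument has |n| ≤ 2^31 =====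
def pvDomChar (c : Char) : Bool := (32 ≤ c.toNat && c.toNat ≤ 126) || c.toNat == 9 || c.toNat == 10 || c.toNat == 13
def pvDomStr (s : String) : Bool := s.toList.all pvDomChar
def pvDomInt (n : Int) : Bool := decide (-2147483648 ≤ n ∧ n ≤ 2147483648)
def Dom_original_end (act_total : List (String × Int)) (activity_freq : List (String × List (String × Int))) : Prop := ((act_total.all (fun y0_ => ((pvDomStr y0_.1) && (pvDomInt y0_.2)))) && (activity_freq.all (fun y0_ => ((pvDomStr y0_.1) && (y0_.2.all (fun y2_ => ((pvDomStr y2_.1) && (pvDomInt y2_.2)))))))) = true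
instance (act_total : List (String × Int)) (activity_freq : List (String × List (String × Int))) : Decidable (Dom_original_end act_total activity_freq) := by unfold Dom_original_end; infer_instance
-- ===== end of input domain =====

-- B replaces A's per-activity power-set enumeration (all non-empty combinations of the
-- non-zero out-arcs, built only to test emptiness) by a direct "has no non-zero out-arc"
-- test per activity: same return value, exponential work removed.

-- the Python dicts behind the association-list arguments (both ports receive dicts)
def pvFr (activity_freq : List (String × List (String × Int))) :
    PySem.Dict String (PySem.Dict String Int) :=
  PySem.Dict.ofList (activity_freq.map (fun p => (p.1, PySem.Dict.ofList p.2)))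

-- ===== PORT A =====
-- itertools.combinations(l, n): the n-element subsequences, in Python's order
def pvCombos : Nat → List String → List (List String)
  | 0, _ => [[]]
  | _+1, [] => []
  | n+1, x :: xs => (pvCombos n xs).map (fun t => x :: t) ++ pvCombos (n+1) xs

-- the 'while n > 0: all_combinations.extend(combinations(out_arcs[key], n)); n -= 1' loop
def pvWhile (l : List String) : Nat → List (List String) → List (List String)
  | 0, acc => acc
  | n+1, acc => pvWhile l n (acc ++ pvCombos (n+1) l)

-- 'for value in fr[key]: if fr[key][value] != 0: filtered.append(value)'
def pvFiltered (inner : PySem.Dict String Int) : List String :=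
  inner.keys.foldl (fun f value => if inner.getD value 0 != 0 then f ++ [value] else f) []

-- 'j = []; for a in i: j.append(a); value_list.append(j)' over all tuples i of value
def pvValueList (value : List (List String)) : List (List String) :=
  value.foldl (fun vl i => vl ++ [i.foldl (fun j a => j ++ [a]) []]) []

-- out_bindings(activity_frequencies), literally: first loop builds out_arcs; second loop
-- threads the mutable n through the fold (the transient 'out_bindings[key] = {}' is
-- immediately overwritten by 'out_bindings[key] = all_combinations' at the same appended
-- position, so the two assignments to the fresh key are one insert); third loop copies
-- each tuple into a list
def pvOutBindings (activity_freq : List (String × List (String × Int))) :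
    PySem.Dict String (List (List String)) :=
  let fr := pvFr activity_freq
  let out_arcs : PySem.Dict String (List String) :=
    fr.keys.foldl (fun oa key =>
      if oa.contains key then oa
      else oa.insert key (pvFiltered (fr.getD key PySem.Dict.empty))) PySem.Dict.empty
  let ob : PySem.Dict String (List (List String)) × Nat :=
    out_arcs.keys.foldl (fun st key =>
      (st.1.insert key (pvWhile (out_arcs.getD key [])
        (if st.1.contains key then st.2 else (out_arcs.getD key []).length) []), 0))
      (PySem.Dict.empty, 0)
  ob.1.items.foldl (fun ol p => ol.insert p.1 (pvValueList p.2)) PySem.Dict.empty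

def original_end (act_total : List (String × Int)) (activity_freq : List (String × List (String × Int))) : List String :=
  let outgoing := pvOutBindings activity_freq
  (PySem.Dict.ofList act_total).keys.foldl (fun res act =>
    if outgoing.contains act then
      (if (outgoing.getD act []).length = 0 ∧ act ∉ res then res ++ [act] else res)
    else res ++ [act]) []

-- ===== PORT B =====
-- [act for act in act_total if act not in activity_freq or not any(activity_freq[act].values())]
def original_end_alt (act_total : List (String × Int)) (activity_freq : List (String × List (String × Int))) : List String :=
  (PySem.Dict.ofList act_total).keys.filter (fun act =>
    match (pvFr activity_freq).get? act with
    | none => true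
    | some inner => inner.values.all (fun v => v == 0))

-- ===== PRECONDITION & SPEC =====
def Spec_original_end (act_total : List (String × Int)) (activity_freq : List (String × List (String × Int))) (out : List String) : Prop := out = original_end_alt act_total activity_freq
instance (act_total : List (String × Int)) (activity_freq : List (String × List (String × Int))) (out : List String) : Decidable (Spec_original_end act_total activity_freq out) := by unfold Spec_original_end; infer_instance

-- ===== CLAIM (what is proved, stated in full; the proofs are below) =====
def Claim_equal_original_end : Prop := ∀ (act_total : List (String × Int)) (activity_freq : List (String × List (String × Int))), Dom_original_end act_total activity_freq → Spec_original_end act_total activity_freq (original_end act_total activity_freq)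

-- ===== LEMMAS AND PROOFS =====

lemma pvCombos_gt (l : List String) : ∀ n, l.length < n → pvCombos n l = [] := by
  induction l with
  | nil => intro n h; cases n with
    | zero => omega
    | succ m => rfl
  | cons x xs ih =>
    intro n h
    cases n with
    | zero => omega
    | succ m =>
      simp only [List.length_cons] at h
      simp [pvCombos, ih m (by omega), ih (m+1) (by omega)]

lemma pvCombos_self (l : List String) : pvCombos l.length l = [l] := by
  induction l with
  | nil => rfl
  | cons x xs ih =>
    show pvCombos (xs.length + 1) (x :: xs) = [x :: xs]
    simp [pvCombos, ih, pvCombos_gt xs (xs.length + 1) (by omega)]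

lemma pvWhile_acc (l : List String) : ∀ (n : Nat) (acc : List (List String)),
    pvWhile l n acc = acc ++ pvWhile l n [] := by
  intro n
  induction n with
  | zero => intro acc; simp [pvWhile]
  | succ n ih =>
    intro acc
    show pvWhile l n (acc ++ pvCombos (n+1) l) = acc ++ pvWhile l n ([] ++ pvCombos (n+1) l)
    rw [ih (acc ++ pvCombos (n+1) l), ih ([] ++ pvCombos (n+1) l)]
    simp

lemma pvWhile_self_eq_nil_iff (l : List String) : (pvWhile l l.length [] = []) ↔ l = [] := by
  cases l with
  | nil => simp [pvWhile]
  | cons x xs =>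
    constructor
    · intro h
      exfalso
      have : pvWhile (x :: xs) (xs.length + 1) [] =
          [] ++ pvCombos (xs.length + 1) (x :: xs) ++ pvWhile (x :: xs) xs.length [] := by
        show pvWhile (x :: xs) xs.length ([] ++ pvCombos (xs.length + 1) (x :: xs)) = _
        rw [pvWhile_acc]
      rw [show xs.length + 1 = (x :: xs).length from rfl, pvCombos_self (x :: xs)] at this
      simp only [List.length_cons] at h this
      rw [h] at this
      simp at this
    · intro h; simp at h

lemma pvValueList_eq (v : List (List String)) : pvValueList v = v := by
  unfold pvValueList
  rw [PySem.List.foldl_append_singleton_eq_map (fun i => i.foldl (fun j a => j ++ [a]) []) v []]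
  simp only [PySem.List.foldl_append_singleton, List.nil_append]
  exact List.map_id v

-- first loop of out_bindings over fresh distinct keys
lemma pv_foldl_oa {ν : Type} (K : List String) (g : String → ν) :
    ∀ (d : PySem.Dict String ν), (∀ k ∈ K, d.contains k = false) → K.Nodup →
    (K.foldl (fun oa key => if oa.contains key then oa else oa.insert key (g key)) d).items
      = d.items ++ K.map (fun k => (k, g k)) := by
  induction K with
  | nil => intro d _ _; simp
  | cons k K ih =>
    intro d hfresh hnd
    have h0 : d.contains k = false := hfresh k (by simp)
    have hnotin : k ∉ K := by simp at hnd; exact hnd.1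
    simp only [List.foldl_cons, h0, Bool.false_eq_true, if_false]
    rw [ih (d.insert k (g k))
      (by intro k' hk'
          rw [PySem.Dict.contains_insert]
          have : k' ≠ k := fun h => hnotin (h ▸ hk')
          simp [this, hfresh k' (by simp [hk'])])
      (by simp at hnd; exact hnd.2)]
    rw [PySem.Dict.items_insert_of_not_contains d (g k) h0]
    simp

-- second loop of out_bindings: the mutable n threaded through the fold; keys are fresh
lemma pv_foldl_ob (K : List String) (f : String → List String) :
    ∀ (d : PySem.Dict String (List (List String))) (n0 : Nat),
    (∀ k ∈ K, d.contains k = false) → K.Nodup →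
    ((K.foldl (fun st key =>
        (st.1.insert key (pvWhile (f key)
          (if st.1.contains key then st.2 else (f key).length) []), 0)) (d, n0)).1).items
      = d.items ++ K.map (fun k => (k, pvWhile (f k) (f k).length [])) := by
  induction K with
  | nil => intro d n0 _ _; simp
  | cons k K ih =>
    intro d n0 hfresh hnd
    have h0 : d.contains k = false := hfresh k (by simp)
    have hnotin : k ∉ K := by simp at hnd; exact hnd.1
    simp only [List.foldl_cons, h0, Bool.false_eq_true, if_false]
    rw [ih (d.insert k (pvWhile (f k) (f k).length [])) 0
      (by intro k' hk'
          rw [PySem.Dict.contains_insert]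
          have : k' ≠ k := fun h => hnotin (h ▸ hk')
          simp [this, hfresh k' (by simp [hk'])])
      (by simp at hnd; exact hnd.2)]
    rw [PySem.Dict.items_insert_of_not_contains d _ h0]
    simp

-- a lookup that succeeds in a dict built by repeated insertion finds an inserted pair
lemma pv_get?_foldl {ν : Type} (l : List (String × ν)) :
    ∀ (d : PySem.Dict String ν) (k : String) (w : ν),
    (l.foldl (fun d p => d.insert p.1 p.2) d).get? k = some w →
      d.get? k = some w ∨ (k, w) ∈ l := by
  induction l with
  | nil => intro d k w h; exact Or.inl h
  | cons p l ih =>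
    intro d k w h
    rcases ih (d.insert p.1 p.2) k w h with h' | h'
    · rw [PySem.Dict.get?_insert] at h'
      by_cases hk : k = p.1
      · right
        rw [if_pos hk] at h'
        have hp : (k, w) = p := by
          injection h' with h2
          rw [hk, ← h2]
        rw [hp]
        exact List.mem_cons_self ..
      · left; rwa [if_neg hk] at h'
    · right; exact List.mem_cons_of_mem _ h'

-- A's final loop collects exactly the activities passing the emptiness test, in order
lemma pv_loopA (d : PySem.Dict String (List (List String))) (K : List String) :
    ∀ (res : List String), K.Nodup → (∀ a ∈ K, a ∉ res) →
    K.foldl (fun res act =>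
        if d.contains act then
          (if (d.getD act []).length = 0 ∧ act ∉ res then res ++ [act] else res)
        else res ++ [act]) res
      = res ++ K.filter (fun act => !(d.contains act) || ((d.getD act []).length == 0)) := by
  induction K with
  | nil => intro res _ _; simp
  | cons a K ih =>
    intro res hnd hres
    have ha : a ∉ res := hres a (by simp)
    have haK : a ∉ K := by simp at hnd; exact hnd.1
    have hndK : K.Nodup := by simp at hnd; exact hnd.2
    simp only [List.foldl_cons, List.filter_cons]
    by_cases hc : d.contains a
    · by_cases hl : (d.getD a []).length = 0
      · rw [if_pos hc, if_pos ⟨hl, ha⟩, ih (res ++ [a]) hndK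
          (by intro b hb; simp only [List.mem_append, List.mem_singleton]
              rintro (h | rfl)
              · exact hres b (by simp [hb]) h
              · exact haK hb)]
        simp [hc, hl]
      · rw [if_pos hc, if_neg (by rintro ⟨h, _⟩; exact hl h), ih res hndK
          (fun b hb => hres b (by simp [hb]))]
        simp [hc, hl]
    · rw [if_neg hc, ih (res ++ [a]) hndK
        (by intro b hb; simp only [List.mem_append, List.mem_singleton]
            rintro (h | rfl)
            · exact hres b (by simp [hb]) h
            · exact haK hb)]
      simp [hc]

-- characterisation of out_bindings: one entry per key of fr, in order
lemma pv_outBindings_items (activity_freq : List (String × List (String × Int))) :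
    (pvOutBindings activity_freq).items = (pvFr activity_freq).keys.map
      (fun k => (k, pvValueList (pvWhile
        (pvFiltered ((pvFr activity_freq).getD k PySem.Dict.empty))
        (pvFiltered ((pvFr activity_freq).getD k PySem.Dict.empty)).length []))) := by
  have hnd : (pvFr activity_freq).keys.Nodup := PySem.Dict.nodup_keys_ofList _
  unfold pvOutBindings
  simp only []
  -- first loop
  have h1 := pv_foldl_oa (pvFr activity_freq).keys
    (fun key => pvFiltered ((pvFr activity_freq).getD key PySem.Dict.empty))
    PySem.Dict.empty (by intro k _; simp) hnd
  have hie : (PySem.Dict.empty : PySem.Dict String (List String)).items = [] := rfl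
  have hie2 : (PySem.Dict.empty : PySem.Dict String (List (List String))).items = [] := rfl
  simp only [hie, List.nil_append] at h1
  set oa := (pvFr activity_freq).keys.foldl (fun oa key =>
      if oa.contains key then oa
      else oa.insert key (pvFiltered ((pvFr activity_freq).getD key PySem.Dict.empty)))
      PySem.Dict.empty with hoa
  have hoaKeys : oa.keys = (pvFr activity_freq).keys := by
    show oa.items.map Prod.fst = _
    rw [h1]; simp [Function.comp_def]
  have hoaNd : oa.keys.Nodup := by rw [hoaKeys]; exact hnd
  -- second loop
  have h2 := pv_foldl_ob oa.keys (fun key => oa.getD key []) PySem.Dict.empty 0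
    (by intro k _; simp) hoaNd
  simp only [hie2, List.nil_append] at h2
  set ob := oa.keys.foldl (fun st key =>
      (st.1.insert key (pvWhile (oa.getD key [])
        (if st.1.contains key then st.2 else (oa.getD key []).length) []), 0))
      (PySem.Dict.empty, 0) with hob
  -- third loop
  have h3 := PySem.Dict.items_foldl_insert_fresh ob.1.items (fun p => p.1)
    (fun p => pvValueList p.2) PySem.Dict.empty (by intro p _; simp)
    (by rw [h2, hoaKeys]; simp only [List.map_map]
        exact hnd.map_on (by intro a _ b _ h; simpa using h))
  rw [h3, h2, hoaKeys]
  simp only [hie2, List.nil_append, List.map_map]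
  apply List.map_congr_left
  intro k hk
  have : oa.getD k [] = pvFiltered ((pvFr activity_freq).getD k PySem.Dict.empty) := by
    apply PySem.Dict.getD_of_mem_items oa _ hoaNd
    rw [h1]
    exact List.mem_map.mpr ⟨k, hk, rfl⟩
  simp [Function.comp, this]

-- each value stored in fr has duplicate-free keys (it is itself a dict built by ofList)
lemma pv_inner_nodup (activity_freq : List (String × List (String × Int)))
    (act : String) (inner : PySem.Dict String Int)
    (h : (pvFr activity_freq).get? act = some inner) : inner.keys.Nodup := by
  have h' : ((activity_freq.map (fun p => (p.1, PySem.Dict.ofList p.2))).foldl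
      (fun d p => d.insert p.1 p.2) PySem.Dict.empty).get? act = some inner := h
  rcases pv_get?_foldl _ PySem.Dict.empty act inner h' with h'' | h''
  · simp [PySem.Dict.get?_empty] at h''
  · rcases List.mem_map.mp h'' with ⟨p, _, hp⟩
    have : inner = PySem.Dict.ofList p.2 := by
      have := congrArg Prod.snd hp; simpa using this.symm
    rw [this]
    exact PySem.Dict.nodup_keys_ofList _

-- the two per-activity tests agree
lemma pv_pred_eq (activity_freq : List (String × List (String × Int))) (act : String) :
    (!(pvOutBindings activity_freq).contains act
      || (((pvOutBindings activity_freq).getD act []).length == 0))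
    = (match (pvFr activity_freq).get? act with
       | none => true
       | some inner => inner.values.all (fun v => v == 0)) := by
  have hnd : (pvFr activity_freq).keys.Nodup := PySem.Dict.nodup_keys_ofList _
  have hkeys : (pvOutBindings activity_freq).keys = (pvFr activity_freq).keys := by
    show (pvOutBindings activity_freq).items.map Prod.fst = _
    rw [pv_outBindings_items]; simp [Function.comp_def]
  cases hg : (pvFr activity_freq).get? act with
  | none =>
    have hmem : act ∉ (pvFr activity_freq).keys :=
      (PySem.Dict.get?_eq_none_iff_not_mem_keys _ _).mp hg
    rw [PySem.Dict.contains_eq_decide_mem_keys, hkeys]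
    simp [hmem]
  | some inner =>
    have hmem : act ∈ (pvFr activity_freq).keys := by
      by_contra hmem
      rw [← PySem.Dict.get?_eq_none_iff_not_mem_keys] at hmem
      rw [hg] at hmem; simp at hmem
    have hcont : (pvOutBindings activity_freq).contains act = true := by
      rw [PySem.Dict.contains_eq_decide_mem_keys, hkeys]; simp [hmem]
    have hinner : (pvFr activity_freq).getD act PySem.Dict.empty = inner :=
      PySem.Dict.getD_of_get?_eq_some _ _ hg
    have hgetD : (pvOutBindings activity_freq).getD act []
        = pvValueList (pvWhile (pvFiltered inner) (pvFiltered inner).length []) := by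
      apply PySem.Dict.getD_of_mem_items _ _ (by rw [hkeys]; exact hnd)
      rw [pv_outBindings_items]
      exact List.mem_map.mpr ⟨act, hmem, by rw [hinner]⟩
    have hinnerNd : inner.keys.Nodup := pv_inner_nodup activity_freq act inner hg
    rw [hcont, hgetD, pvValueList_eq]
    show (!true || ((pvWhile (pvFiltered inner) (pvFiltered inner).length []).length == 0))
        = inner.values.all (fun v => v == 0)
    have hfil : pvFiltered inner
        = inner.keys.filter (fun v => inner.getD v 0 != 0) := by
      unfold pvFiltered
      have h := PySem.List.foldl_append_if (fun v => inner.getD v 0 != 0) (fun v => v) inner.keys []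
      simpa using h
    rw [PySem.Dict.values_eq_map_keys inner hinnerNd 0]
    simp only [Bool.not_true, Bool.false_or, List.all_map]
    by_cases hz : ∀ v ∈ inner.keys, inner.getD v 0 = 0
    · have hnil : pvFiltered inner = [] := by
        rw [hfil, List.filter_eq_nil_iff]
        intro v hv; simp [hz v hv]
      rw [hnil]
      show ((pvWhile [] 0 []).length == 0) = _
      symm
      simp only [pvWhile, List.length_nil]
      rw [show ((0:Nat) == 0) = true from rfl, List.all_eq_true]
      intro v hv
      simp [Function.comp, hz v hv]
    · rw [not_forall] at hz
      rcases hz with ⟨v, hv⟩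
      rw [Classical.not_imp, ← ne_eq] at hv
      rcases hv with ⟨hv, hvz⟩
      have hne : pvFiltered inner ≠ [] := by
        rw [hfil]
        intro h
        rw [List.filter_eq_nil_iff] at h
        exact h v hv (by simp [hvz])
      have hlen : (pvWhile (pvFiltered inner) (pvFiltered inner).length []).length ≠ 0 := by
        intro h0
        exact hne ((pvWhile_self_eq_nil_iff _).mp (List.eq_nil_of_length_eq_zero h0))
      rw [beq_eq_false_iff_ne.mpr hlen]
      symm
      rw [List.all_eq_false]
      exact ⟨v, hv, by simp [Function.comp, hvz]⟩

-- ===== VERDICT (by name: the statement is the Claim_ definition above) =====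
theorem original_end_spec : Claim_equal_original_end := by
  intro act_total activity_freq _
  unfold Spec_original_end original_end original_end_alt
  simp only []
  rw [pv_loopA (pvOutBindings activity_freq) (PySem.Dict.ofList act_total).keys []
    (PySem.Dict.nodup_keys_ofList _) (by intro a _ h; exact (List.not_mem_nil h).elim)]
  rw [List.nil_append]
  apply List.filter_congr
  intro act _
  exact pv_pred_eq activity_freq act
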